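-- pv_equiv track=rewrite | github.com/clarinsi/standardness | select_tweets.py | form_output
-- ===== SOURCE A (Python) =====
-- def form_output(inp):
--     output = []
--     space_after = 'SpaceAfter=No'
--     previous_token = ''
--     for sent_idx, sent in enumerate(inp):
--         for token_idx, (token, start, end) in enumerate(sent):
--             if not token[0].isspace():
--                 if previous_token:
--                     output.append((previous_token, space_after))
--                 previous_token = token
--                 space_after = 'SpaceAfter=No'
--             else:
--                 space_after = ''
--     output.append((previous_token, space_after))
--     return output
-- ===== SOURCE B (Python) =====
-- def form_output(inp):
--     tokens = [token for sent in inp for (token, start, end) in sent]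
--     out = []
--     for tok, nxt in zip(tokens, tokens[1:] + ['']):
--         if not tok[0].isspace():
--             out.append((tok, '' if nxt[:1].isspace() else 'SpaceAfter=No'))
--     return out
-- ===== Notes on version B (the rewrite author's own statement) =====
-- stated objective: alternative
-- what changed: Replaces A's deferred previous-token/space_after state machine with a flatten-then-lookahead pass: each non-whitespace token is emitted immediately, its marker decided by peeking at the next token in the flattened stream; Pre_ excludes inputs containing an empty token string, on which A raises IndexError.
-- intended difference: On inputs with no non-whitespace token (including the empty input) A returns the bogus single pair ('', '') or ('', 'SpaceAfter=No') built from its empty previous_token sentinel, while B returns the empty list, which is the intended output when there are no tokens to emit. — e.g. on form_output([[(" ", 0, 1)]]): A returns [("", "")], B returns []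
import Mathlib
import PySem

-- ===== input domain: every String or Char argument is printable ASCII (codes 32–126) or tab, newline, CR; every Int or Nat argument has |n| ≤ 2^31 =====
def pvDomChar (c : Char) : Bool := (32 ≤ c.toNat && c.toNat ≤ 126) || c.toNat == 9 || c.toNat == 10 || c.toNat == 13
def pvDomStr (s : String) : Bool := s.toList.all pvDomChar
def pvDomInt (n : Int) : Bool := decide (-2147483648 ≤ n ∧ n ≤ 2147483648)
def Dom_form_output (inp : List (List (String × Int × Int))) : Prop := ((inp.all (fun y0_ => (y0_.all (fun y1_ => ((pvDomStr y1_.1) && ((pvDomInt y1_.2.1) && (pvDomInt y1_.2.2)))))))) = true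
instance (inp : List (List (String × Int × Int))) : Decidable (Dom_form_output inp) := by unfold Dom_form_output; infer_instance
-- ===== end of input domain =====

-- B replaces A's deferred previous-token state machine by a flatten-then-lookahead pass (alternative decomposition, same cost); equivalence is on the return value.

-- ===== PORT A =====
-- token[0].isspace() : first character's Python isspace (Pre_ guarantees the token is nonempty; the `none` branch is unreachable inside Pre_)
def pvHeadIsSpace (t : String) : Bool :=
  match PySem.List.pyGet? t.toList 0 with
  | some c => PySem.Chars.isspace c
  | none => false

def form_output (inp : List (List (String × Int × Int))) : List (String × String) :=
  let st := inp.foldl (fun (st : List (String × String) × String × String) sent =>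
    sent.foldl (fun (st : List (String × String) × String × String) tse =>
      let (output, space_after, previous_token) := st
      let (token, _start, _end) := tse
      if ¬ pvHeadIsSpace token then
        ((if previous_token ≠ "" then output ++ [(previous_token, space_after)] else output),
         "SpaceAfter=No", token)
      else
        (output, "", previous_token)) st)
    ([], "SpaceAfter=No", "")
  st.1 ++ [(st.2.2, st.2.1)]

-- ===== PORT B =====
-- nxt[:1].isspace() : Python str.isspace on the one-character (or empty) prefix
def pvPrefixIsSpace (t : String) : Bool :=
  PySem.Str.strIsspace (String.ofList (PySem.List.slice t.toList none (some 1)))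

def form_output_alt (inp : List (List (String × Int × Int))) : List (String × String) :=
  let tokens := inp.flatMap (fun sent => sent.map (fun tse => tse.1))
  (tokens.zip (tokens.drop 1 ++ [""])).foldl
    (fun out (p : String × String) =>
      if ¬ pvHeadIsSpace p.1 then
        out ++ [(p.1, if pvPrefixIsSpace p.2 then "" else "SpaceAfter=No")]
      else out) []

-- ===== PRECONDITION & SPEC =====
-- Pre_ excludes exactly the inputs on which Python A raises IndexError: a token equal to '' (token[0] fails).
def Pre_form_output (inp : List (List (String × Int × Int))) : Prop :=
  ∀ sent ∈ inp, ∀ tse ∈ sent, (tse : String × Int × Int).1 ≠ ""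
instance (inp : List (List (String × Int × Int))) : Decidable (Pre_form_output inp) := by unfold Pre_form_output; infer_instance

def pvWitness_form_output : (List (List (String × Int × Int))) :=
  [[("Hi", 0, 2), (" ", 2, 3)], [("there", 3, 8), ("!", 8, 9)]]

-- whether a token string starts with a Python-whitespace character (closed-form test on the input)
def pvTokWs (t : String) : Bool :=
  match t.toList with
  | [] => false
  | c :: _ => PySem.Chars.isspace c

-- On inputs with no non-whitespace token (including the empty input) A returns the bogus single pair ('', '') or ('', 'SpaceAfter=No') built from its empty previous_token sentinel, while B returns the empty list, which is the intended output when there are no tokens to emit.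
def D_form_output (inp : List (List (String × Int × Int))) : Prop :=
  ∀ sent ∈ inp, ∀ tse ∈ sent, pvTokWs (tse : String × Int × Int).1 = true
instance (inp : List (List (String × Int × Int))) : Decidable (D_form_output inp) := by unfold D_form_output; infer_instance

def Spec_form_output (inp : List (List (String × Int × Int))) (out : List (String × String)) : Prop := ¬ D_form_output inp → out = form_output_alt inp
instance (inp : List (List (String × Int × Int))) (out : List (String × String)) : Decidable (Spec_form_output inp out) := by unfold Spec_form_output; infer_instance

def pvDiffWitness_form_output : (List (List (String × Int × Int))) := [[(" ", 0, 1)]]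
def pvDiffWitnessOut_form_output : (List (String × String)) × (List (String × String)) :=
  ([("", "")], [])

-- ===== CLAIM (what is proved, stated in full; the proofs are below) =====
def Claim_unchanged_form_output : Prop := ∀ (inp : List (List (String × Int × Int))), Dom_form_output inp → Pre_form_output inp → Spec_form_output inp (form_output inp)
def Claim_changed_form_output : Prop := Dom_form_output (pvDiffWitness_form_output) ∧ Pre_form_output (pvDiffWitness_form_output) ∧ D_form_output (pvDiffWitness_form_output) ∧ form_output (pvDiffWitness_form_output) = pvDiffWitnessOut_form_output.1 ∧ form_output_alt (pvDiffWitness_form_output) = pvDiffWitnessOut_form_output.2 ∧ pvDiffWitnessOut_form_output.1 ≠ pvDiffWitnessOut_form_output.2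
def Claim_exact_form_output : Prop := ∀ (inp : List (List (String × Int × Int))), Dom_form_output inp → Pre_form_output inp → D_form_output inp → form_output inp ≠ form_output_alt inp

-- ===== LEMMAS AND PROOFS =====

-- the canonical lookahead result on the flat token list
def pvMark : List String → String
  | [] => "SpaceAfter=No"
  | u :: _ => if pvHeadIsSpace u then "" else "SpaceAfter=No"

def pvGo : List String → List (String × String)
  | [] => []
  | t :: rest => if pvHeadIsSpace t then pvGo rest else (t, pvMark rest) :: pvGo rest

def pvStepA (st : List (String × String) × String × String) (token : String) :
    List (String × String) × String × String :=
  if ¬ pvHeadIsSpace token then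
    ((if st.2.2 ≠ "" then st.1 ++ [(st.2.2, st.2.1)] else st.1), "SpaceAfter=No", token)
  else
    (st.1, "", st.2.2)

def pvFinish (st : List (String × String) × String × String) : List (String × String) :=
  st.1 ++ [(st.2.2, st.2.1)]

def pvMhd (sa : String) : List String → String
  | [] => sa
  | u :: _ => if pvHeadIsSpace u then "" else sa

theorem pvA_flat (inp : List (List (String × Int × Int)))
    (st : List (String × String) × String × String) :
    inp.foldl (fun st sent =>
      sent.foldl (fun (st : List (String × String) × String × String) tse =>
        let (output, space_after, previous_token) := st
        let (token, _start, _end) := tse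
        if ¬ pvHeadIsSpace token then
          ((if previous_token ≠ "" then output ++ [(previous_token, space_after)] else output),
           "SpaceAfter=No", token)
        else
          (output, "", previous_token)) st) st
    = List.foldl pvStepA st (inp.flatMap (fun sent => sent.map (fun tse => tse.1))) := by
  induction inp generalizing st with
  | nil => rfl
  | cons sent rest ih =>
    simp only [List.foldl_cons, List.flatMap_cons, List.foldl_append, ih]
    congr 1
    rw [List.foldl_map]
    induction sent generalizing st with
    | nil => rfl
    | cons t ts ih2 =>
      obtain ⟨o, sa, p⟩ := st
      obtain ⟨tok, a, b⟩ := t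
      rw [List.foldl_cons, List.foldl_cons]
      exact ih2 _

theorem pvL (ts : List String) (hne : ∀ t ∈ ts, t ≠ "")
    (out : List (String × String)) (sa prev : String) (hp : prev ≠ "") :
    pvFinish (List.foldl pvStepA (out, sa, prev) ts)
      = out ++ (prev, pvMhd sa ts) :: pvGo ts := by
  induction ts generalizing out sa prev with
  | nil => simp [pvFinish, pvMhd, pvGo]
  | cons t rest ih =>
    have ht : t ≠ "" := hne t (by simp)
    have hrest : ∀ u ∈ rest, u ≠ "" := fun u hu => hne u (by simp [hu])
    rw [List.foldl_cons]
    by_cases hw : pvHeadIsSpace t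
    · have hstep : pvStepA (out, sa, prev) t = (out, "", prev) := by simp [pvStepA, hw]
      rw [hstep, ih hrest out "" prev hp]
      have h1 : pvMhd "" rest = "" := by cases rest <;> simp [pvMhd]
      rw [h1]
      simp [pvGo, pvMhd, hw]
    · have hstep : pvStepA (out, sa, prev) t
          = (out ++ [(prev, sa)], "SpaceAfter=No", t) := by simp [pvStepA, hw, hp]
      rw [hstep, ih hrest _ _ t ht]
      have h1 : pvMhd "SpaceAfter=No" rest = pvMark rest := by
        cases rest <;> simp [pvMhd, pvMark]
      rw [h1]
      simp [pvGo, pvMhd, hw]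

theorem pvL0 (ts : List String) (hne : ∀ t ∈ ts, t ≠ "") (sa : String) :
    pvFinish (List.foldl pvStepA ([], sa, "") ts)
      = if ts.any (fun t => ¬ pvHeadIsSpace t) then pvGo ts
        else [("", pvMhd sa ts)] := by
  induction ts generalizing sa with
  | nil => simp [pvFinish, pvMhd]
  | cons t rest ih =>
    have ht : t ≠ "" := hne t (by simp)
    have hrest : ∀ u ∈ rest, u ≠ "" := fun u hu => hne u (by simp [hu])
    rw [List.foldl_cons]
    by_cases hw : pvHeadIsSpace t
    · have hstep : pvStepA ([], sa, "") t = ([], "", "") := by simp [pvStepA, hw]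
      rw [hstep, ih hrest ""]
      have h1 : pvMhd "" rest = "" := by cases rest <;> simp [pvMhd]
      rw [h1]
      simp [List.any_cons, hw, pvGo, pvMhd]
    · have hstep : pvStepA ([], sa, "") t = ([], "SpaceAfter=No", t) := by
        simp [pvStepA, hw]
      rw [hstep, pvL rest hrest [] "SpaceAfter=No" t ht]
      have h1 : pvMhd "SpaceAfter=No" rest = pvMark rest := by
        cases rest <;> simp [pvMhd, pvMark]
      rw [h1]
      simp [List.any_cons, hw, pvGo]

theorem pvPrefix_eq (t : String) (ht : t ≠ "") : pvPrefixIsSpace t = pvHeadIsSpace t := by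
  unfold pvPrefixIsSpace pvHeadIsSpace
  cases h : t.toList with
  | nil => exact absurd (by simpa using congrArg String.ofList h) ht
  | cons c cs =>
    simp [PySem.List.slice, PySem.List.pyGet?, PySem.List.pyIdx?, PySem.Str.strIsspace,
      PySem.Chars.strIsspace]

theorem pvPrefix_nil : pvPrefixIsSpace "" = false := by decide

theorem pvTokWs_eq (t : String) (ht : t ≠ "") : pvTokWs t = pvHeadIsSpace t := by
  unfold pvTokWs pvHeadIsSpace
  cases h : t.toList with
  | nil => exact absurd (by simpa using congrArg String.ofList h) ht
  | cons c cs => simp [PySem.List.pyGet?, PySem.List.pyIdx?]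

theorem pvZ (ts : List String) (hne : ∀ t ∈ ts, t ≠ "") (acc : List (String × String)) :
    (ts.zip (ts.drop 1 ++ [""])).foldl
      (fun acc (p : String × String) =>
        if ¬ pvHeadIsSpace p.1 then
          acc ++ [(p.1, if pvPrefixIsSpace p.2 then "" else "SpaceAfter=No")]
        else acc) acc
    = acc ++ pvGo ts := by
  induction ts generalizing acc with
  | nil => simp [pvGo]
  | cons t rest ih =>
    have hrest : ∀ u ∈ rest, u ≠ "" := fun u hu => hne u (by simp [hu])
    have hzip : (t :: rest).zip ((t :: rest).drop 1 ++ [""])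
        = (t, match rest with | [] => "" | u :: _ => u) :: rest.zip (rest.drop 1 ++ [""]) := by
      cases rest <;> rfl
    rw [hzip]
    simp only [List.foldl_cons]
    by_cases hw : pvHeadIsSpace t
    · rw [if_neg (by simp [hw])]
      rw [ih hrest acc]
      simp [pvGo, hw]
    · rw [if_pos (by simp [hw])]
      rw [ih hrest]
      simp only [pvGo, if_neg hw, List.append_assoc, List.singleton_append]
      congr 2
      cases rest with
      | nil => simp [pvMark, pvPrefix_nil]
      | cons u us =>
        have hu : u ≠ "" := hrest u (by simp)
        simp [pvMark, pvPrefix_eq u hu]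

theorem pvGo_eq_nil (ts : List String) :
    pvGo ts = [] ↔ ts.any (fun t => ¬ pvHeadIsSpace t) = false := by
  induction ts with
  | nil => simp [pvGo]
  | cons t rest ih =>
    by_cases hw : pvHeadIsSpace t
    · simp [pvGo, hw, ih]
    · simp [pvGo, hw]

-- tokens flattened, their nonemptiness, and the bridge D ↔ no non-whitespace token
theorem pv_ts_ne (inp : List (List (String × Int × Int))) (hpre : Pre_form_output inp) :
    ∀ t ∈ inp.flatMap (fun sent => sent.map (fun tse => tse.1)), t ≠ "" := by
  intro t ht
  simp only [List.mem_flatMap, List.mem_map] at ht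
  obtain ⟨sent, hs, tse, htse, rfl⟩ := ht
  exact hpre sent hs tse htse

theorem pvD_any (inp : List (List (String × Int × Int))) (hpre : Pre_form_output inp) :
    D_form_output inp ↔
      ((inp.flatMap (fun sent => sent.map (fun tse => tse.1))).any
        (fun t => ¬ pvHeadIsSpace t)) = false := by
  constructor
  · intro hd
    rw [List.any_eq_false]
    intro t ht
    have hne := pv_ts_ne inp hpre t ht
    simp only [List.mem_flatMap, List.mem_map] at ht
    obtain ⟨sent, hs, tse, htse, rfl⟩ := ht
    have := hd sent hs tse htse
    rw [pvTokWs_eq _ hne] at this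
    simp [this]
  · intro hf sent hs tse htse
    rw [List.any_eq_false] at hf
    have hmem : tse.1 ∈ inp.flatMap (fun sent => sent.map (fun tse => tse.1)) := by
      simp only [List.mem_flatMap, List.mem_map]
      exact ⟨sent, hs, tse, htse, rfl⟩
    have := hf _ hmem
    rw [pvTokWs_eq _ (hpre sent hs tse htse)]
    simpa using this

theorem pvA_closed (inp : List (List (String × Int × Int))) (hpre : Pre_form_output inp) :
    form_output inp
      = (if (inp.flatMap (fun sent => sent.map (fun tse => tse.1))).any
            (fun t => ¬ pvHeadIsSpace t)
         then pvGo (inp.flatMap (fun sent => sent.map (fun tse => tse.1)))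
         else [("", pvMhd "SpaceAfter=No" (inp.flatMap (fun sent => sent.map (fun tse => tse.1))))]) := by
  unfold form_output
  rw [pvA_flat]
  have hL0 := pvL0 _ (pv_ts_ne inp hpre) "SpaceAfter=No"
  unfold pvFinish at hL0
  simpa using hL0

theorem pvB_closed (inp : List (List (String × Int × Int))) (hpre : Pre_form_output inp) :
    form_output_alt inp = pvGo (inp.flatMap (fun sent => sent.map (fun tse => tse.1))) := by
  unfold form_output_alt
  rw [pvZ _ (pv_ts_ne inp hpre)]
  simp

-- ===== VERDICT (by name: the statement is the Claim_ definition above) =====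
theorem form_output_spec : Claim_unchanged_form_output := by
  intro inp _hdom hpre hnd
  rw [pvA_closed inp hpre, pvB_closed inp hpre]
  rw [pvD_any inp hpre] at hnd
  rw [if_pos (by simpa using hnd)]

theorem form_output_changed : Claim_changed_form_output := by
  unfold Claim_changed_form_output; decide

theorem form_output_tight : Claim_exact_form_output := by
  intro inp _hdom hpre hd
  rw [pvA_closed inp hpre, pvB_closed inp hpre]
  have hf := (pvD_any inp hpre).mp hd
  rw [if_neg (by rw [hf]; simp)]
  rw [(pvGo_eq_nil _).mpr hf]
  simp
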